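-- pv_equiv track=rewrite | github.com/Mr-Spect3r/Py2Byte | Bytecode2Py.py | Getargcount
-- ===== SOURCE A (Python) =====
-- def Getargcount(codes):
--     stored_first = set()
--     load_first = set()
--     for code in codes:
--         if code[0] == "STORE_FAST" and code[1] not in load_first:
--             stored_first.add(code[1])
--         elif code[0] == "LOAD_FAST" and code[1] not in stored_first:
--             load_first.add(code[1])
--     return len(load_first)
-- ===== SOURCE B (Python) =====
-- def Getargcount(codes):
--     relevant = [c for c in codes if c[0] in ("STORE_FAST", "LOAD_FAST")]
--     names = []
--     for _, n in relevant:
--         if n not in names: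
--             names.append(n)
--     return sum(1 for n in names
--                if next(op for op, m in relevant if m == n) == "LOAD_FAST")
-- ===== Notes on version B (the rewrite author's own statement) =====
-- stated objective: alternative
-- what changed: Instead of one pass maintaining two mutually-guarding sets, B filters out the STORE_FAST/LOAD_FAST entries, lists the distinct names, and for each name searches the filtered list for its first entry, counting those whose first entry is a LOAD_FAST.
import Mathlib
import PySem

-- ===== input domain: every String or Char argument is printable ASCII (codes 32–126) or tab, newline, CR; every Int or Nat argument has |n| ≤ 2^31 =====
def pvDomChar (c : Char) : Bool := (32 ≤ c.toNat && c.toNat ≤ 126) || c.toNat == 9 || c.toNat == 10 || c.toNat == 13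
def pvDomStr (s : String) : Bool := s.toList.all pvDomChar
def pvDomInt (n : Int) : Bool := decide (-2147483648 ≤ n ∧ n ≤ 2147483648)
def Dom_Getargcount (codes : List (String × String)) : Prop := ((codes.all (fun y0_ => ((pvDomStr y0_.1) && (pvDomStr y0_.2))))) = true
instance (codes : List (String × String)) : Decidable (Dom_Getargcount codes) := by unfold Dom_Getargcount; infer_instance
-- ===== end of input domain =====

-- B replaces A's single pass with two mutually-guarding sets by staged passes: filter the
-- relevant entries, collect the distinct names, then search the filtered list per name for
-- its first relevant opcode and count the LOAD_FAST ones (objective: alternative).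

-- ===== PORT A =====
-- loop body of A's for-loop (state = (stored_first, load_first))
def pvStepA (st : PySem.Set String × PySem.Set String) (code : String × String) :
    PySem.Set String × PySem.Set String :=
  if code.1 == "STORE_FAST" && !(PySem.Set.contains st.2 code.2) then
    (PySem.Set.add st.1 code.2, st.2)
  else if code.1 == "LOAD_FAST" && !(PySem.Set.contains st.1 code.2) then
    (st.1, PySem.Set.add st.2 code.2)
  else st

def Getargcount (codes : List (String × String)) : Int :=
  let st := codes.foldl pvStepA (PySem.Set.empty, PySem.Set.empty)
  PySem.Set.len st.2

-- ===== PORT B =====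
-- `c[0] in ("STORE_FAST", "LOAD_FAST")`
def pvIsRel (c : String × String) : Bool := c.1 == "STORE_FAST" || c.1 == "LOAD_FAST"

def Getargcount_alt (codes : List (String × String)) : Int :=
  let relevant := codes.filter pvIsRel
  -- the dedup loop: `if n not in names: names.append(n)`
  let names := relevant.foldl (fun ns (c : String × String) =>
    if ns.contains c.2 then ns else ns ++ [c.2]) ([] : List String)
  -- `sum(1 for n in names if next(op for op, m in relevant if m == n) == "LOAD_FAST")`
  -- (`next` on the generator = first match in `relevant`; it never raises since n comes from relevant)
  ((names.filter (fun n =>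
    (relevant.find? (fun p => p.2 == n)).map Prod.fst == some "LOAD_FAST")).length : Int)

-- ===== PRECONDITION & SPEC =====
def Spec_Getargcount (codes : List (String × String)) (out : Int) : Prop := out = Getargcount_alt codes
instance (codes : List (String × String)) (out : Int) : Decidable (Spec_Getargcount codes out) := by unfold Spec_Getargcount; infer_instance

-- ===== CLAIM (what is proved, stated in full; the proofs are below) =====
def Claim_equal_Getargcount : Prop := ∀ (codes : List (String × String)), Dom_Getargcount codes → Spec_Getargcount codes (Getargcount codes)

-- ===== LEMMAS AND PROOFS =====

-- the first relevant opcode recorded for name n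
def pvFirstRel (codes : List (String × String)) (n : String) : Option String :=
  ((codes.filter pvIsRel).find? (fun p => p.2 == n)).map Prod.fst

lemma pvFirstRel_cons_rel {op m : String} {t : List (String × String)} (n : String)
    (h : pvIsRel (op, m) = true) :
    pvFirstRel ((op, m) :: t) n = if m = n then some op else pvFirstRel t n := by
  by_cases hmn : m = n
  · subst hmn; simp [pvFirstRel, h]
  · simp [pvFirstRel, h, hmn]

lemma pvFirstRel_cons_irrel {op m : String} {t : List (String × String)} (n : String)
    (h : pvIsRel (op, m) = false) :
    pvFirstRel ((op, m) :: t) n = pvFirstRel t n := by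
  simp [pvFirstRel, h]

-- membership characterisation of A's load_first set after the fold
lemma pv_mem_fold_L (codes : List (String × String)) (S L : PySem.Set String) (n : String) :
    n ∈ (codes.foldl pvStepA (S, L)).2 ↔
      n ∈ L ∨ (n ∉ S ∧ n ∉ L ∧ pvFirstRel codes n = some "LOAD_FAST") := by
  induction codes generalizing S L with
  | nil => simp [pvFirstRel]
  | cons c t ih =>
    obtain ⟨op, m⟩ := c
    rw [List.foldl_cons]
    by_cases hst : op = "STORE_FAST"
    · subst hst
      have hrel : pvIsRel ("STORE_FAST", m) = true := by simp [pvIsRel]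
      rw [pvFirstRel_cons_rel n hrel]
      by_cases hmL : m ∈ L
      · have hstep : pvStepA (S, L) ("STORE_FAST", m) = (S, L) := by
          simp [pvStepA, hmL]
        rw [hstep, ih]
        by_cases hmn : m = n
        · subst hmn; simp [hmL]
        · simp [hmn]
      · have hstep : pvStepA (S, L) ("STORE_FAST", m) = (PySem.Set.add S m, L) := by
          simp [pvStepA, hmL]
        rw [hstep, ih]
        by_cases hmn : m = n
        · subst hmn; simp [PySem.Set.mem_add]
        · have hnm : ¬ n = m := fun h => hmn h.symm
          simp only [PySem.Set.mem_add, hmn, hnm]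
          tauto
    · by_cases hld : op = "LOAD_FAST"
      · subst hld
        have hrel : pvIsRel ("LOAD_FAST", m) = true := by simp [pvIsRel]
        rw [pvFirstRel_cons_rel n hrel]
        by_cases hmS : m ∈ S
        · have hstep : pvStepA (S, L) ("LOAD_FAST", m) = (S, L) := by
            simp [pvStepA, hmS]
          rw [hstep, ih]
          by_cases hmn : m = n
          · subst hmn; simp [hmS]
          · simp [hmn]
        · have hstep : pvStepA (S, L) ("LOAD_FAST", m) = (S, PySem.Set.add L m) := by
            simp [pvStepA, hmS]
          rw [hstep, ih]
          by_cases hmn : m = n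
          · subst hmn
            by_cases hmL : m ∈ L
            · simp [hmL]
            · simp [hmL, hmS]
          · have hnm : ¬ n = m := fun h => hmn h.symm
            simp only [PySem.Set.mem_add, hmn, hnm]
            tauto
      · have hrel : pvIsRel (op, m) = false := by simp [pvIsRel, hst, hld]
        have hstep : pvStepA (S, L) (op, m) = (S, L) := by
          simp [pvStepA, hst, hld]
        rw [hstep, ih, pvFirstRel_cons_irrel n hrel]

-- A's load_first set stays duplicate-free
lemma pv_nodup_fold_L (codes : List (String × String)) (S L : PySem.Set String)
    (h : L.Nodup) : ((codes.foldl pvStepA (S, L)).2).Nodup := by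
  induction codes generalizing S L with
  | nil => exact h
  | cons c t ih =>
    rw [List.foldl_cons]
    unfold pvStepA
    split_ifs with h1 h2
    · exact ih _ _ h
    · exact ih _ _ (PySem.Set.nodup_add _ _ h)
    · exact ih _ _ h

-- B's dedup loop is PySem.Set.ofList of the names of the relevant entries
lemma pv_names_eq (rel : List (String × String)) :
    rel.foldl (fun ns (c : String × String) =>
        if ns.contains c.2 then ns else ns ++ [c.2]) ([] : List String)
      = PySem.Set.ofList (rel.map Prod.snd) := by
  rw [PySem.Set.ofList_eq_foldl, List.foldl_map]
  rfl

-- ===== VERDICT (by name: the statement is the Claim_ definition above) =====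
theorem Getargcount_spec : Claim_equal_Getargcount := by
  intro codes _
  simp only [Spec_Getargcount, Getargcount, Getargcount_alt]
  rw [pv_names_eq]
  -- both sides count, without repetition, the names whose first relevant opcode is LOAD_FAST
  have hmem : ∀ n, n ∈ (codes.foldl pvStepA (PySem.Set.empty, PySem.Set.empty)).2 ↔
      n ∈ (PySem.Set.ofList ((codes.filter pvIsRel).map Prod.snd)).filter (fun n =>
        ((codes.filter pvIsRel).find? (fun p => p.2 == n)).map Prod.fst == some "LOAD_FAST") := by
    intro n
    rw [pv_mem_fold_L]
    simp only [PySem.Set.empty, List.not_mem_nil, not_false_iff, true_and, List.mem_filter,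
      PySem.Set.mem_ofList, List.mem_map, false_or]
    constructor
    · intro h
      have h' := h
      unfold pvFirstRel at h'
      refine ⟨?_, by simpa [pvFirstRel] using h⟩
      rcases Option.map_eq_some_iff.mp h' with ⟨p, hp, _⟩
      have hmem := List.mem_of_find?_eq_some hp
      have hpn : p.2 = n := by simpa using List.find?_some hp
      exact ⟨p, List.mem_filter.mp hmem, hpn⟩
    · intro ⟨_, h⟩
      simpa [pvFirstRel] using h
  have hperm : (codes.foldl pvStepA (PySem.Set.empty, PySem.Set.empty)).2.Perm
      ((PySem.Set.ofList ((codes.filter pvIsRel).map Prod.snd)).filter (fun n =>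
        ((codes.filter pvIsRel).find? (fun p => p.2 == n)).map Prod.fst == some "LOAD_FAST")) := by
    refine (List.perm_ext_iff_of_nodup ?_ ?_).mpr hmem
    · exact pv_nodup_fold_L codes _ _ List.nodup_nil
    · exact List.Nodup.filter _ (PySem.Set.nodup_ofList _)
  simp only [PySem.Set.len]
  exact congrArg _ hperm.length_eq
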